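-- pv_equiv track=rewrite | github.com/SirVincelot24/AoC25 | day6/problem2.py | batchOperatorList
-- ===== SOURCE A (Python) =====
-- def batchOperatorList(lst):
--     batchedList = []
--     batch = []
--     for i in range(len(lst)):
--         if i == 0:
--             batch.append(lst[i])
--             continue
--         if not (lst[i] == "+" or lst[i] == "*"):
--             batch.append(lst[i])
--             continue
--         else:
--             batchedList.append(tuple(batch))
--             batch.clear()
--             batch.append(lst[i])
--     batchedList.append(tuple(batch))
--     return batchedList
-- ===== SOURCE B (Python) =====
-- def _span(xs):
--     # split xs at the first operator: (prefix before it, suffix from it on)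
--     for k in range(len(xs)):
--         if xs[k] == "+" or xs[k] == "*":
--             return xs[:k], xs[k:]
--     return xs, []
--
--
-- def batchOperatorList(lst):
--     if not lst:
--         return [()]
--     out = []
--     rest = lst
--     while rest:
--         head, tail = rest[0], rest[1:]
--         pre, rest = _span(tail)
--         out.append(tuple([head] + pre))
--     return out
-- ===== Notes on version B (the rewrite author's own statement) =====
-- stated objective: simpler
-- what changed: Replaces A's indexed single pass with a running batch and flush-on-operator by a chunking loop: split off the head plus the span of non-operators as one slice per iteration and continue on the remaining suffix.
import Mathlib
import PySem

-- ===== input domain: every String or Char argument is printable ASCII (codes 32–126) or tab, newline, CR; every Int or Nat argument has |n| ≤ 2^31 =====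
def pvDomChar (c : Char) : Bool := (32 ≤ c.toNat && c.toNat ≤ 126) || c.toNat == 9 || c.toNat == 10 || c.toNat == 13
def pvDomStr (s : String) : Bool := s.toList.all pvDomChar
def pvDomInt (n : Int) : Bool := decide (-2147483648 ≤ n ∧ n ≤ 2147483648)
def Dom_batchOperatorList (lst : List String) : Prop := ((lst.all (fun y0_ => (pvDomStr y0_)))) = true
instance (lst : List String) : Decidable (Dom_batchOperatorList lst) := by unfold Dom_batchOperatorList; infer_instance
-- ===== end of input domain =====

-- B groups by head-plus-span-of-non-operators and recursion, instead of A's indexed pass with a running batch and flush; same O(n) cost, simpler shape.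

-- ===== PORT A =====
-- A's loop state: (batchedList, batch); i runs over range(len(lst)), lst[i] is always in range (pyGetD default unreachable).
def batchOperatorList (lst : List String) : List (List String) :=
  let st := (PySem.List.pyRange 0 (PySem.List.len lst) 1).foldl
    (fun (s : List (List String) × List String) i =>
      if i == 0 then (s.1, s.2 ++ [PySem.List.pyGetD lst i ""])
      else if ¬(PySem.List.pyGetD lst i "" == "+" || PySem.List.pyGetD lst i "" == "*") then
        (s.1, s.2 ++ [PySem.List.pyGetD lst i ""])
      else
        (s.1 ++ [s.2], [PySem.List.pyGetD lst i ""]))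
    ([], [])
  st.1 ++ [st.2]

-- ===== PORT B =====
-- port of Source B's _span: split at the first operator
def bSpan (xs : List String) : List String × List String :=
  match xs with
  | [] => ([], [])
  | s :: t =>
    if s == "+" || s == "*" then ([], s :: t)
    else
      let (p, r) := bSpan t
      (s :: p, r)

theorem bSpan_snd_length_le (xs : List String) : (bSpan xs).2.length ≤ xs.length := by
  induction xs with
  | nil => simp [bSpan]
  | cons s t ih =>
    simp only [bSpan]
    split
    · simp
    · simpa using Nat.le_succ_of_le ih

-- port of Source B's while loop: peel off head plus the span of non-operators as one chunk
def bLoop (out : List (List String)) (rest : List String) : List (List String) :=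
  match rest with
  | [] => out
  | head :: tail =>
    let pre := (bSpan tail).1
    let rest' := (bSpan tail).2
    bLoop (out ++ [head :: pre]) rest'
termination_by rest.length
decreasing_by
  simp only [List.length_cons]
  exact Nat.lt_succ_of_le (bSpan_snd_length_le tail)

def batchOperatorList_alt (lst : List String) : List (List String) :=
  match lst with
  | [] => [[]]
  | _ => bLoop [] lst

-- ===== PRECONDITION & SPEC =====
def Spec_batchOperatorList (lst : List String) (out : List (List String)) : Prop := out = batchOperatorList_alt lst
instance (lst : List String) (out : List (List String)) : Decidable (Spec_batchOperatorList lst out) := by unfold Spec_batchOperatorList; infer_instance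

-- ===== CLAIM (what is proved, stated in full; the proofs are below) =====
def Claim_equal_batchOperatorList : Prop := ∀ (lst : List String), Dom_batchOperatorList lst → Spec_batchOperatorList lst (batchOperatorList lst)

-- ===== LEMMAS AND PROOFS =====

-- the element-wise step of A's loop after index 0
def aStep (s : List (List String) × List String) (e : String) : List (List String) × List String :=
  if ¬(e == "+" || e == "*") then (s.1, s.2 ++ [e]) else (s.1 ++ [s.2], [e])

-- the flushed result of running A's tail loop from (bl, b)
def aRun (bl : List (List String)) (b : List String) (xs : List String) : List (List String) :=
  let st := xs.foldl aStep (bl, b)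
  st.1 ++ [st.2]

theorem aRun_cons (bl : List (List String)) (b : List String) (e : String) (t : List String) :
    aRun bl b (e :: t) = aRun (aStep (bl, b) e).1 (aStep (bl, b) e).2 t := rfl

theorem aStep_op (bl : List (List String)) (b : List String) (e : String)
    (h : (e == "+" || e == "*") = true) : aStep (bl, b) e = (bl ++ [b], [e]) := by
  simp [aStep, h]

theorem aStep_nop (bl : List (List String)) (b : List String) (e : String)
    (h : ¬((e == "+" || e == "*") = true)) : aStep (bl, b) e = (bl, b ++ [e]) := by
  simp [aStep, h]

theorem aRun_prepend (xs : List String) (bl : List (List String)) (b : List String) :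
    aRun bl b xs = bl ++ aRun [] b xs := by
  induction xs generalizing bl b with
  | nil => simp [aRun]
  | cons e t ih =>
    rw [aRun_cons, aRun_cons]
    by_cases h : (e == "+" || e == "*") = true
    · rw [aStep_op bl b e h, aStep_op [] b e h]
      show aRun (bl ++ [b]) [e] t = bl ++ aRun ([] ++ [b]) [e] t
      rw [ih (bl ++ [b]) [e], ih ([] ++ [b]) [e]]
      simp
    · rw [aStep_nop bl b e h, aStep_nop [] b e h]
      exact ih bl (b ++ [e])

-- proof-only recursive view of B's while loop
def bGo (xs : List String) : List (List String) :=
  match xs with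
  | [] => []
  | head :: tail =>
    let pre := (bSpan tail).1
    let rest := (bSpan tail).2
    (head :: pre) :: (if rest = [] then [] else bGo rest)
termination_by xs.length
decreasing_by
  simp only [List.length_cons]
  exact Nat.lt_succ_of_le (bSpan_snd_length_le tail)

theorem bLoop_eq_bGo (n : Nat) (xs : List String) (hn : xs.length ≤ n) (out : List (List String)) :
    bLoop out xs = out ++ bGo xs := by
  induction n generalizing xs out with
  | zero =>
    match xs, hn with
    | [], _ => simp [bLoop, bGo]
  | succ n ih =>
    match xs with
    | [] => simp [bLoop, bGo]
    | head :: tail =>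
      rw [bLoop, bGo]
      by_cases hr : (bSpan tail).2 = []
      · rw [hr]
        simp [bLoop]
      · rw [if_neg hr, ih _ (by
          have := bSpan_snd_length_le tail
          simp at hn
          omega)]
        simp

theorem bGo_cons (e : String) (t : List String) :
    bGo (e :: t) = (e :: (bSpan t).1) :: (if (bSpan t).2 = [] then [] else bGo (bSpan t).2) := by
  rw [bGo]

-- main invariant: A's tail loop flushed equals B's chunking, with b the batch so far
theorem aRun_eq_chunks (xs : List String) (b : List String) :
    aRun [] b xs =
      (b ++ (bSpan xs).1) ::
        (if (bSpan xs).2 = [] then [] else bGo (bSpan xs).2) := by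
  induction xs generalizing b with
  | nil => simp [aRun, bSpan]
  | cons e t ih =>
    rw [aRun_cons]
    by_cases h : (e == "+" || e == "*") = true
    · rw [aStep_op [] b e h]
      show aRun ([] ++ [b]) [e] t = _
      rw [aRun_prepend t ([] ++ [b]) [e], ih [e]]
      have h2 : bSpan (e :: t) = ([], e :: t) := by simp [bSpan, h]
      rw [h2, bGo_cons]
      simp
    · rw [aStep_nop [] b e h]
      show aRun [] (b ++ [e]) t = _
      rw [ih (b ++ [e])]
      have h2 : bSpan (e :: t) = (e :: (bSpan t).1, (bSpan t).2) := by
        simp only [bSpan, h]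
        simp
      rw [h2]
      simp

-- A's indexed loop, after the first iteration, is the element-wise fold over the tail
theorem batchOperatorList_eq_aRun (x : String) (xs : List String) :
    batchOperatorList (x :: xs) = aRun [] [x] xs := by
  unfold batchOperatorList
  have h0 : (0 : Int) < PySem.List.len (x :: xs) := by
    simp [PySem.List.len]
  rw [PySem.List.pyRange_one_cons h0]
  simp only [List.foldl_cons, beq_self_eq_true, if_true]
  have hget0 : PySem.List.pyGetD (x :: xs) 0 "" = x := by
    simp [PySem.List.pyGetD, PySem.List.pyGet?, PySem.List.pyIdx?]
  rw [hget0]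
  -- on indices 1 ≤ i the 'i == 0' branch is dead
  have hcong : (PySem.List.pyRange (0 + 1) (PySem.List.len (x :: xs)) 1).foldl
      (fun (s : List (List String) × List String) i =>
        if i == 0 then (s.1, s.2 ++ [PySem.List.pyGetD (x :: xs) i ""])
        else if ¬(PySem.List.pyGetD (x :: xs) i "" == "+" || PySem.List.pyGetD (x :: xs) i "" == "*") then
          (s.1, s.2 ++ [PySem.List.pyGetD (x :: xs) i ""])
        else (s.1 ++ [s.2], [PySem.List.pyGetD (x :: xs) i ""])) (([], ([] : List String) ++ [x]))
      = (PySem.List.pyRange (0 + 1) (PySem.List.len (x :: xs)) 1).foldl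
        (fun (s : List (List String) × List String) i => aStep s (PySem.List.pyGetD (x :: xs) i ""))
        (([], ([] : List String) ++ [x])) := by
    apply PySem.List.foldl_congr_mem
    intro s i hi
    have h1 : 1 ≤ i := by
      have := (PySem.List.mem_pyRange_one).1 hi
      omega
    have hne : (i == 0) = false := by simp; omega
    simp only [hne, Bool.false_eq_true, if_false, aStep]
  rw [hcong]
  rw [show (0 : Int) + 1 = 1 by norm_num]
  rw [PySem.List.foldl_pyRange_pyGetD (xs := x :: xs) (a := 1) (d := "")
      (f := aStep) (init := (([], ([] : List String) ++ [x]))) (by norm_num)]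
  rfl

theorem batchOperatorList_nil : batchOperatorList [] = [[]] := by decide

-- ===== VERDICT (by name: the statement is the Claim_ definition above) =====
theorem batchOperatorList_spec : Claim_equal_batchOperatorList := by
  intro lst _
  unfold Spec_batchOperatorList
  match lst with
  | [] => rw [batchOperatorList_nil]; rfl
  | x :: xs =>
    rw [batchOperatorList_eq_aRun, aRun_eq_chunks]
    show _ = bLoop [] (x :: xs)
    rw [bLoop_eq_bGo (x :: xs).length _ (le_refl _), bGo_cons]
    simp
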